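-- pv_equiv track=rewrite | github.com/tasticolly/anti-plagiarism | compare.py | getDF
-- ===== SOURCE A (Python) =====
-- from collections import defaultdict
--
-- def getDF(documents):
--     df = dict()
--     frequency = dict()
--     general_count = 0
--     for text in documents:
--         is_used = defaultdict(bool)
--         for word in text.split():
--             general_count += 1
--             frequency[word] = frequency.get(word, 0) + 1
--             if not is_used[word]:
--                 df[word] = df.get(word, 0) + 1
--                 is_used[word] = True
--     return df, frequency
-- ===== SOURCE B (Python) =====
-- from collections import Counter
--
-- def getDF(documents):
--     doc_sets = [set(text.split()) for text in documents]
--     frequency = dict(Counter(w for text in documents for w in text.split()))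
--     df = {w: sum(1 for s in doc_sets if w in s) for w in frequency}
--     return df, frequency
-- ===== Notes on version B (the rewrite author's own statement) =====
-- stated objective: alternative
-- what changed: Replaces A's single interleaved per-word loop (manual get/set counting plus a per-document is_used flag dict and an unused general_count) with staged passes: frequency is one global Counter over the flattened word stream, and df is computed afterwards per distinct word by counting how many precomputed per-document word-sets contain it -- no per-word df increments at all.
import Mathlib
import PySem

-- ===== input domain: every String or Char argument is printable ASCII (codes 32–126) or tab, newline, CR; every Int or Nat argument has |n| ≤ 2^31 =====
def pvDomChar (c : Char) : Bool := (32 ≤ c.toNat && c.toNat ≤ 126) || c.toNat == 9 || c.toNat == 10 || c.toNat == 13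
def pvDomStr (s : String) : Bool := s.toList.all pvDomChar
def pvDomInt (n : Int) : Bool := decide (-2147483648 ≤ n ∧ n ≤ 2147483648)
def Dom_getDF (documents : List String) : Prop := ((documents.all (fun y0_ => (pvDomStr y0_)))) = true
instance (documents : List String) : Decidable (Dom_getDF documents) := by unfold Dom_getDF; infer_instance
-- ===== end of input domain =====

-- B replaces A's single interleaved per-word loop (manual counting + is_used flags + unused
-- general_count) with staged passes: one global Counter over the flattened word stream for
-- frequency, then df computed per distinct word by counting the per-document word-sets that
-- contain it (alternative decomposition; return value only — no mutation).

-- ===== PORT A =====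
-- state: (df, frequency, general_count, is_used)
def getDF (documents : List String) : (List (String × Int)) × (List (String × Int)) :=
  let st := documents.foldl
    (fun (st : PySem.Dict String Int × PySem.Dict String Int × Int) text =>
      let inner := (PySem.Str.split₀ text).foldl
        (fun (s : PySem.Dict String Int × PySem.Dict String Int × Int × PySem.Dict String Bool) word =>
          let gc := s.2.2.1 + 1
          let freq := s.2.1.insert word (s.2.1.getD word 0 + 1)
          if ¬ (s.2.2.2.getD word false) then
            (s.1.insert word (s.1.getD word 0 + 1), freq, gc, s.2.2.2.insert word true)
          else
            (s.1, freq, gc, s.2.2.2))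
        (st.1, st.2.1, st.2.2, PySem.Dict.empty)
      (inner.1, inner.2.1, inner.2.2.1))
    (PySem.Dict.empty, PySem.Dict.empty, 0)
  (st.1.items, st.2.1.items)

-- ===== PORT B =====
-- doc_sets = [set(text.split()) for text in documents]
-- frequency = dict(Counter(w for text in documents for w in text.split()))
-- df = {w: sum(1 for s in doc_sets if w in s) for w in frequency}
def getDF_alt (documents : List String) : (List (String × Int)) × (List (String × Int)) :=
  let docSets := documents.map (fun text => PySem.Set.ofList (PySem.Str.split₀ text))
  let frequency := PySem.Dict.counter (documents.flatMap (fun text => PySem.Str.split₀ text))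
  let df := frequency.keys.foldl
    (fun d w =>
      d.insert w (docSets.foldl (fun acc s => if PySem.Set.contains s w then acc + 1 else acc) (0 : Int)))
    PySem.Dict.empty
  (df.items, frequency.items)

-- ===== PRECONDITION & SPEC =====
def Spec_getDF (documents : List String) (out : (List (String × Int)) × (List (String × Int))) : Prop := out = getDF_alt documents
instance (documents : List String) (out : (List (String × Int)) × (List (String × Int))) : Decidable (Spec_getDF documents out) := by unfold Spec_getDF; infer_instance

-- ===== CLAIM (what is proved, stated in full; the proofs are below) =====
def Claim_equal_getDF : Prop := ∀ (documents : List String), Dom_getDF documents → Spec_getDF documents (getDF documents)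

-- ===== LEMMAS AND PROOFS =====

-- words not yet marked used, in first-occurrence order, relative to a Bool predicate
def pvNew (p : String → Bool) : List String → List String
  | [] => []
  | w :: ws => if p w then pvNew p ws else w :: pvNew (fun x => x == w || p x) ws

theorem pvNew_congr (p q : String → Bool) (h : ∀ x, p x = q x) :
    ∀ ws, pvNew p ws = pvNew q ws := by
  intro ws
  induction ws generalizing p q with
  | nil => rfl
  | cons w ws ih =>
    rw [pvNew, pvNew, h w]
    by_cases hq : q w = true
    · rw [if_pos hq, if_pos hq]; exact ih p q h
    · rw [if_neg hq, if_neg hq]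
      exact congrArg _ (ih _ _ (fun x => by rw [h x]))

theorem pvSet_add_eq :
    ∀ (ws : List String) (s : PySem.Set String),
    ws.foldl PySem.Set.add s = s ++ pvNew (fun x => PySem.Set.contains s x) ws := by
  intro ws
  induction ws with
  | nil => intro s; simp [pvNew]
  | cons w ws ih =>
    intro s
    rw [List.foldl_cons, pvNew]
    by_cases h : PySem.Set.contains s w = true
    · rw [if_pos h]
      have ha : PySem.Set.add s w = s := by
        have hm : w ∈ s := by simpa using h
        simp [PySem.Set.add, hm]
      rw [ha, ih s]
    · rw [if_neg h]
      have ha : PySem.Set.add s w = s ++ [w] := by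
        have h' : w ∉ s := by simpa using h
        simp [PySem.Set.add, h']
      have hc : ∀ x, (fun x => PySem.Set.contains (s ++ [w]) x) x
          = (fun x => x == w || PySem.Set.contains s x) x := by
        intro x; simp [PySem.Set.contains, Bool.or_comm, beq_eq_decide]
      rw [ha, ih (s ++ [w]),
        pvNew_congr (fun x => PySem.Set.contains (s ++ [w]) x)
          (fun x => x == w || PySem.Set.contains s x) hc ws]
      simp

theorem pvDedup_eq (ws : List String) :
    PySem.List.dedup ws = pvNew (fun _ => false) ws := by
  have h := pvSet_add_eq ws ([] : PySem.Set String)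
  have hc : ∀ x, (fun x => PySem.Set.contains ([] : PySem.Set String) x) x
      = (fun _ : String => false) x := by
    intro x; simp [PySem.Set.contains]
  rw [pvNew_congr _ _ hc ws] at h
  simpa [PySem.List.dedup, PySem.Set.ofList_eq_foldl, PySem.Set.empty] using h

-- A's inner per-word loop body, named for the proofs (definitionally the lambda in the port)
def pvStepW (s : PySem.Dict String Int × PySem.Dict String Int × Int × PySem.Dict String Bool)
    (word : String) :
    PySem.Dict String Int × PySem.Dict String Int × Int × PySem.Dict String Bool :=
  let gc := s.2.2.1 + 1
  let freq := s.2.1.insert word (s.2.1.getD word 0 + 1)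
  if ¬ (s.2.2.2.getD word false) then
    (s.1.insert word (s.1.getD word 0 + 1), freq, gc, s.2.2.2.insert word true)
  else
    (s.1, freq, gc, s.2.2.2)

theorem pvStepW_pos (df freq : PySem.Dict String Int) (gc : Int)
    (used : PySem.Dict String Bool) (w : String) (h : used.getD w false = true) :
    pvStepW (df, freq, gc, used) w
      = (df, freq.insert w (freq.getD w 0 + 1), gc + 1, used) := by
  simp [pvStepW, h]

theorem pvStepW_neg (df freq : PySem.Dict String Int) (gc : Int)
    (used : PySem.Dict String Bool) (w : String) (h : used.getD w false = false) :
    pvStepW (df, freq, gc, used) w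
      = (df.insert w (df.getD w 0 + 1), freq.insert w (freq.getD w 0 + 1), gc + 1,
         used.insert w true) := by
  simp [pvStepW, h]

theorem pvModify_eq_insert (d : PySem.Dict String Int) (w : String) :
    d.modify w 0 (· + 1) = d.insert w (d.getD w 0 + 1) := by
  simp [PySem.Dict.modify, PySem.Dict.getD_eq_get?_getD]

-- A's inner word loop = (bulk df update over unmarked first occurrences, bulk frequency update, count)
theorem pvInner :
    ∀ (ws : List String) (df freq : PySem.Dict String Int) (gc : Int)
      (used : PySem.Dict String Bool),
    ∃ u,
      ws.foldl pvStepW (df, freq, gc, used)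
      = ((pvNew (fun x => used.getD x false) ws).foldl (fun d w => d.modify w 0 (· + 1)) df,
         ws.foldl (fun d w => d.modify w 0 (· + 1)) freq,
         gc + ws.length, u) := by
  intro ws
  induction ws with
  | nil =>
    intro df freq gc used
    exact ⟨used, by simp [pvNew]⟩
  | cons w ws ih =>
    intro df freq gc used
    rw [List.foldl_cons, List.foldl_cons, pvNew, pvModify_eq_insert]
    cases h : used.getD w false
    · rw [if_neg (by simp), pvStepW_neg df freq gc used w h]
      obtain ⟨u, hu⟩ := ih (df.insert w (df.getD w 0 + 1)) (freq.insert w (freq.getD w 0 + 1))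
        (gc + 1) (used.insert w true)
      refine ⟨u, ?_⟩
      rw [hu, List.foldl_cons, pvModify_eq_insert]
      have hc : ∀ x, (fun x => (used.insert w true).getD x false) x
          = (fun x => x == w || used.getD x false) x := by
        intro x
        by_cases hx : x = w
        · simp [hx, PySem.Dict.getD_insert_self]
        · simp [PySem.Dict.getD_insert, hx, beq_eq_decide]
      rw [pvNew_congr _ _ hc ws]
      have hlen : gc + 1 + (ws.length : Int) = gc + ((w :: ws).length : Int) := by
        push_cast [List.length_cons]; ring
      rw [hlen]
    · rw [if_pos rfl, pvStepW_pos df freq gc used w h]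
      obtain ⟨u, hu⟩ := ih df (freq.insert w (freq.getD w 0 + 1)) (gc + 1) used
      refine ⟨u, ?_⟩
      rw [hu]
      have hlen : gc + 1 + (ws.length : Int) = gc + ((w :: ws).length : Int) := by
        push_cast [List.length_cons]; ring
      rw [hlen]

-- A's document-loop body, named for the proofs (definitionally the lambda inside the port)
def pvStepA (st : PySem.Dict String Int × PySem.Dict String Int × Int) (text : String) :
    PySem.Dict String Int × PySem.Dict String Int × Int :=
  let inner := (PySem.Str.split₀ text).foldl pvStepW (st.1, st.2.1, st.2.2, PySem.Dict.empty)
  (inner.1, inner.2.1, inner.2.2.1)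

-- per-document reduction of A: df takes a fold over the deduped words, frequency over all words
def pvDfStep (d : PySem.Dict String Int) (text : String) : PySem.Dict String Int :=
  (PySem.List.dedup (PySem.Str.split₀ text)).foldl (fun d w => d.modify w 0 (· + 1)) d

def pvFrStep (d : PySem.Dict String Int) (text : String) : PySem.Dict String Int :=
  (PySem.Str.split₀ text).foldl (fun d w => d.modify w 0 (· + 1)) d

theorem pvStepA_eq (st : PySem.Dict String Int × PySem.Dict String Int × Int) (text : String) :
    ∃ g, pvStepA st text = (pvDfStep st.1 text, pvFrStep st.2.1 text, g) := by
  obtain ⟨u, hu⟩ := pvInner (PySem.Str.split₀ text) st.1 st.2.1 st.2.2 PySem.Dict.empty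
  refine ⟨st.2.2 + (PySem.Str.split₀ text).length, ?_⟩
  unfold pvStepA pvDfStep pvFrStep
  simp only
  rw [hu, pvDedup_eq]
  have hc : ∀ x, (fun _ : String => false) x
      = (fun x => (PySem.Dict.empty : PySem.Dict String Bool).getD x false) x := by
    intro x; simp [PySem.Dict.getD_empty]
  rw [pvNew_congr _ _ hc (PySem.Str.split₀ text)]

theorem pvOuter (docs : List String) :
    ∀ (df freq : PySem.Dict String Int) (gc : Int),
    ∃ g, docs.foldl pvStepA (df, freq, gc)
      = (docs.foldl pvDfStep df, docs.foldl pvFrStep freq, g) := by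
  induction docs with
  | nil => intro df freq gc; exact ⟨gc, rfl⟩
  | cons t ts ih =>
    intro df freq gc
    rw [List.foldl_cons, List.foldl_cons, List.foldl_cons]
    obtain ⟨g1, h1⟩ := pvStepA_eq (df, freq, gc) t
    rw [h1]
    exact ih _ _ g1

-- updating a set with the deduped list is updating it with the list itself
theorem pvUpdate_dedup (s : PySem.Set String) (xs : List String) :
    PySem.Set.update s (PySem.List.dedup xs) = PySem.Set.update s xs := by
  rw [PySem.List.dedup_eq_ofList, PySem.Set.update_eq_append_filter,
    PySem.Set.update_eq_append_filter, PySem.Set.ofList_ofList]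

theorem pvDfKeys (docs : List String) :
    ∀ d : PySem.Dict String Int,
    (docs.foldl pvDfStep d).keys
      = PySem.Set.update d.keys (docs.flatMap (fun t => PySem.Str.split₀ t)) := by
  induction docs with
  | nil => intro d; simp [PySem.Set.update_nil]
  | cons t ts ih =>
    intro d
    rw [List.foldl_cons, ih, List.flatMap_cons, PySem.Set.update_append]
    unfold pvDfStep
    rw [PySem.Dict.keys_foldl_modify, pvUpdate_dedup]

theorem pvDfNodup (docs : List String) :
    ∀ d : PySem.Dict String Int, d.keys.Nodup → (docs.foldl pvDfStep d).keys.Nodup := by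
  induction docs with
  | nil => intro d h; exact h
  | cons t ts ih =>
    intro d h
    rw [List.foldl_cons]
    exact ih _ (PySem.Dict.nodup_keys_foldl_modify_key _ (fun x => x) 0 (fun _ _ v => v + 1) d h)

theorem pvDfGetD (docs : List String) :
    ∀ (d : PySem.Dict String Int) (w : String),
    (docs.foldl pvDfStep d).getD w 0
      = d.getD w 0 + (docs.countP (fun t => decide (w ∈ PySem.Str.split₀ t)) : Int) := by
  induction docs with
  | nil => intro d w; simp
  | cons t ts ih =>
    intro d w
    rw [List.foldl_cons, ih, List.countP_cons]
    unfold pvDfStep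
    rw [PySem.Dict.getD_foldl_modify_add_one]
    have hcnt : (PySem.List.dedup (PySem.Str.split₀ t)).count w
        = if w ∈ PySem.Str.split₀ t then 1 else 0 := by
      rw [PySem.List.dedup_eq_ofList,
        List.Nodup.count (PySem.Set.nodup_ofList (PySem.Str.split₀ t))]
      simp [PySem.Set.mem_ofList]
    rw [hcnt]
    by_cases h : w ∈ PySem.Str.split₀ t
    · simp only [h, decide_true, if_true]
      push_cast; ring
    · simp only [h, decide_false, if_false]
      push_cast; ring

-- membership in the per-document set is membership in the word list
theorem pvContains_ofList (ws : List String) (w : String) :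
    PySem.Set.contains (PySem.Set.ofList ws) w = decide (w ∈ ws) := by
  simp [PySem.Set.contains, PySem.Set.mem_ofList]

-- ===== VERDICT (by name: the statement is the Claim_ definition above) =====
theorem getDF_spec : Claim_equal_getDF := by
  intro documents _
  show getDF documents = getDF_alt documents
  obtain ⟨g, hg⟩ := pvOuter documents PySem.Dict.empty PySem.Dict.empty 0
  show ((documents.foldl pvStepA (PySem.Dict.empty, PySem.Dict.empty, 0)).1.items,
        (documents.foldl pvStepA (PySem.Dict.empty, PySem.Dict.empty, 0)).2.1.items)
      = getDF_alt documents
  rw [hg]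
  simp only
  unfold getDF_alt
  simp only
  -- frequency: A's nested fold is the Counter of the flattened word stream
  have hfr : documents.foldl pvFrStep PySem.Dict.empty
      = PySem.Dict.counter (documents.flatMap (fun text => PySem.Str.split₀ text)) := by
    rw [PySem.Dict.counter_eq_foldl, List.foldl_flatMap]
    rfl
  -- df: both sides are (distinct words, document count) in first-occurrence order
  have hkeysA : (documents.foldl pvDfStep PySem.Dict.empty).keys
      = PySem.Set.ofList (documents.flatMap (fun t => PySem.Str.split₀ t)) := by
    rw [pvDfKeys]
    simp [PySem.Dict.keys_empty, PySem.Set.update_nil_left]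
  have hnd : (documents.foldl pvDfStep PySem.Dict.empty).keys.Nodup :=
    pvDfNodup documents _ (by simp [PySem.Dict.keys_empty])
  have hitemsA : (documents.foldl pvDfStep PySem.Dict.empty).items
      = (PySem.Set.ofList (documents.flatMap (fun t => PySem.Str.split₀ t))).map
          (fun w => (w, (documents.countP (fun t => decide (w ∈ PySem.Str.split₀ t)) : Int))) := by
    rw [PySem.Dict.items_eq_map_keys _ hnd 0, hkeysA]
    refine List.map_congr_left (fun w _ => ?_)
    rw [pvDfGetD]
    simp
  have hkeysB : (PySem.Dict.counter (documents.flatMap (fun text => PySem.Str.split₀ text))).keys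
      = PySem.Set.ofList (documents.flatMap (fun t => PySem.Str.split₀ t)) :=
    PySem.Dict.keys_counter _
  have hitemsB :
      ((PySem.Dict.counter (documents.flatMap (fun text => PySem.Str.split₀ text))).keys.foldl
        (fun d w => d.insert w
          ((documents.map (fun text => PySem.Set.ofList (PySem.Str.split₀ text))).foldl
            (fun acc s => if PySem.Set.contains s w then acc + 1 else acc) (0 : Int)))
        PySem.Dict.empty).items
      = (PySem.Set.ofList (documents.flatMap (fun t => PySem.Str.split₀ t))).map
          (fun w => (w, (documents.countP (fun t => decide (w ∈ PySem.Str.split₀ t)) : Int))) := by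
    rw [PySem.Dict.items_foldl_insert_fresh _ (fun w => w) _ PySem.Dict.empty
        (fun a _ => PySem.Dict.contains_empty a) (by simp [hkeysB, PySem.Set.nodup_ofList]),
      hkeysB]
    simp only [PySem.Dict.empty, List.nil_append]
    refine List.map_congr_left (fun w _ => ?_)
    rw [PySem.List.foldl_count_if, List.countP_map, zero_add]
    refine congrArg (fun n : Nat => ((w, (n : Int)) : String × Int)) (List.countP_congr (fun t _ => ?_))
    simp only [Function.comp]
    exact Eq.to_iff (congrArg (· = true) (pvContains_ofList (PySem.Str.split₀ t) w))
  rw [hfr, hitemsA, ← hitemsB]
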